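-- pv_equiv track=rewrite | github.com/jquiaot/glowing-winner-leetcode | leetcode/2138__divide_a_string_into_groups_of_size_k.py | divideString1
-- ===== SOURCE A (Python) =====
-- def divideString1(s: str, k: int, fill: str) -> list[str]:
--     groups = []
--     remaining = len(s)
--     i = 0
--     while remaining > 0:
--         if remaining >= k:
--             groups.append(s[i:i + k])
--         else:
--             groups.append(s[i:i + remaining] + fill * (k - remaining))
--         i += k
--         remaining -= k
--     return groups
-- ===== SOURCE B (Python) =====
-- def divideString1(s: str, k: int, fill: str) -> list[str]:
--     groups = []
--     cur = []
--     for ch in s: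
--         cur.append(ch)
--         if len(cur) == k:
--             groups.append(''.join(cur))
--             cur = []
--     if cur:
--         groups.append(''.join(cur) + fill * (k - len(cur)))
--     return groups
-- ===== Notes on version B (the rewrite author's own statement) =====
-- stated objective: alternative
-- what changed: B does a single character-by-character pass with a current-chunk accumulator (flushing it whenever it reaches size k, padding the leftover at the end), instead of A's index/remaining countdown loop over slices with a per-chunk tail branch; B uses no slicing or index arithmetic at all.
import Mathlib
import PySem

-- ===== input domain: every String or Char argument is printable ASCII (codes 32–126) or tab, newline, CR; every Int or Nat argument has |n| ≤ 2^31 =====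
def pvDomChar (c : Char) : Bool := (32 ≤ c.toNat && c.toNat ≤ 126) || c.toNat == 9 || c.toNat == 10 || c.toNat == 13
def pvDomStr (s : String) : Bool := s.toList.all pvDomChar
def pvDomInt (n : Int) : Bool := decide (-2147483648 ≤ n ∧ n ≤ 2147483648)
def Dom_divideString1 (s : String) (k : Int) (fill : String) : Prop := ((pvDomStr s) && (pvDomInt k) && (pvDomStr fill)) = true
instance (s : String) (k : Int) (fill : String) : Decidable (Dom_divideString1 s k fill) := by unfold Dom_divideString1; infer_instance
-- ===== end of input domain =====

-- B rebuilds the groups in one character-by-character pass with a current-chunk accumulator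
-- (flushed at size k, leftover padded at the end) instead of A's index/remaining slicing loop.


-- ===== PORT A =====
-- the while loop of A; fuel only makes the recursion total (Python diverges for k ≤ 0 and nonempty s, outside Pre_)
def loopA (cs fillcs : List Char) (k : Int) : Nat → List (List Char) → Int → Int → List (List Char)
  | 0, groups, _, _ => groups
  | fuel + 1, groups, remaining, i =>
    if remaining > 0 then
      loopA cs fillcs k fuel
        (groups ++ [if remaining ≥ k then PySem.List.slice cs (some i) (some (i + k))
          else PySem.List.slice cs (some i) (some (i + remaining)) ++ PySem.List.pyRepeat fillcs (k - remaining)])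
        (remaining - k) (i + k)
    else groups

def divideString1 (s : String) (k : Int) (fill : String) : List String :=
  (loopA s.toList fill.toList k (s.toList.length + 1) [] (s.toList.length : Int) 0).map String.ofList

-- ===== PORT B =====
-- the loop body of Source B: append ch to cur, flush cur into groups when len(cur) == k
def stepB (k : Int) (st : List (List Char) × List Char) (ch : Char) : List (List Char) × List Char :=
  let cur := st.2 ++ [ch]
  if (cur.length : Int) = k then (st.1 ++ [cur], []) else (st.1, cur)

-- groups are kept as List Char and joined (''.join / string concat) once at the end; exact,
-- since Python's ''.join(cur) and + are concatenation
def divideString1_alt (s : String) (k : Int) (fill : String) : List String :=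
  let st := s.toList.foldl (stepB k) ([], [])
  (if st.2 ≠ [] then st.1 ++ [st.2 ++ PySem.List.pyRepeat fill.toList (k - st.2.length)]
   else st.1).map String.ofList

-- ===== PRECONDITION & SPEC =====
-- Pre_ excludes exactly k ≤ 0 with nonempty s, where A's while loop never terminates (remaining
-- never decreases); A returns on every other input and is matched there.
def Pre_divideString1 (s : String) (k : Int) (fill : String) : Prop := 1 ≤ k ∨ s = ""
instance (s : String) (k : Int) (fill : String) : Decidable (Pre_divideString1 s k fill) := by
  unfold Pre_divideString1; infer_instance
def pvWitness_divideString1 : String × Int × String := ("abcde", 3, "x")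
def Spec_divideString1 (s : String) (k : Int) (fill : String) (out : List String) : Prop := out = divideString1_alt s k fill
instance (s : String) (k : Int) (fill : String) (out : List String) : Decidable (Spec_divideString1 s k fill out) := by unfold Spec_divideString1; infer_instance

-- ===== CLAIM (what is proved, stated in full; the proofs are below) =====
def Claim_equal_divideString1 : Prop := ∀ (s : String) (k : Int) (fill : String), Dom_divideString1 s k fill → Pre_divideString1 s k fill → Spec_divideString1 s k fill (divideString1 s k fill)

-- ===== LEMMAS AND PROOFS =====

-- the common chunk decomposition both ports compute; chunk size is K+1 (so termination is unconditional)
def chunksA (fillcs : List Char) (K : Nat) : List Char → List (List Char)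
  | [] => []
  | c :: rest =>
    (if K + 1 ≤ (c :: rest).length then (c :: rest).take (K + 1)
     else (c :: rest) ++ PySem.List.pyRepeat fillcs (((K : Int) + 1) - (c :: rest).length))
      :: chunksA fillcs K (rest.drop K)
termination_by t => t.length
decreasing_by simp

lemma loopA_nonpos (cs fillcs : List Char) (k : Int) (fuel : Nat) (acc : List (List Char))
    (r i : Int) (hr : ¬ r > 0) : loopA cs fillcs k fuel acc r i = acc := by
  cases fuel <;> simp [loopA, hr]

lemma loopA_eq (cs fillcs : List Char) (K : Nat) :
    ∀ (fuel : Nat) (j : Nat) (acc : List (List Char)), j ≤ cs.length → cs.length - j < fuel →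
      loopA cs fillcs ((K : Int) + 1) fuel acc ((cs.length : Int) - (j : Int)) (j : Int)
        = acc ++ chunksA fillcs K (cs.drop j) := by
  intro fuel
  induction fuel with
  | zero => intro j acc hj hf; omega
  | succ fuel ih =>
    intro j acc hj hf
    by_cases hjn : j = cs.length
    · subst hjn
      rw [loopA]
      simp [chunksA, List.drop_eq_nil_of_le (le_refl cs.length)]
    · have hjlt : j < cs.length := lt_of_le_of_ne hj hjn
      have hpos : ((cs.length : Int) - (j : Int)) > 0 := by
        have : (j : Int) < (cs.length : Int) := by exact_mod_cast hjlt
        omega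
      obtain ⟨c, rest, hdrop⟩ : ∃ c rest, cs.drop j = c :: rest := by
        cases h : cs.drop j with
        | nil =>
          exfalso
          have := congrArg List.length h
          simp at this
          omega
        | cons c rest => exact ⟨c, rest, rfl⟩
      have hlend : (cs.drop j).length = cs.length - j := by simp
      have hlrest : rest.length = cs.length - j - 1 := by
        rw [hdrop] at hlend; simp at hlend; omega
      rw [loopA, if_pos hpos]
      by_cases hge : ((cs.length : Int) - (j : Int)) ≥ ((K : Int) + 1)
      · -- full chunk
        rw [if_pos hge]
        have hKn : j + (K + 1) ≤ cs.length := by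
          have : ((K : Int) + 1) ≤ (cs.length : Int) - (j : Int) := hge
          push_cast at this ⊢
          omega
        have hslice : PySem.List.slice cs (some (j : Int)) (some ((j : Int) + ((K : Int) + 1)))
            = (cs.drop j).take (K + 1) := by
          have h1 := PySem.List.slice_natCast_add cs j (K + 1)
          push_cast at h1
          exact h1
        have e1 : ((cs.length : Int) - (j : Int)) - ((K : Int) + 1)
            = (cs.length : Int) - ((j + (K + 1) : Nat) : Int) := by push_cast; ring
        have e2 : ((j : Int) + ((K : Int) + 1)) = (((j + (K + 1) : Nat)) : Int) := by push_cast; ring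
        rw [hslice, e1, e2, ih (j + (K + 1)) _ hKn (by omega)]
        have hdrop2 : cs.drop (j + (K + 1)) = rest.drop K := by
          have : cs.drop (j + (K + 1)) = (cs.drop j).drop (K + 1) := by
            rw [List.drop_drop]
          rw [this, hdrop]
          simp
        rw [hdrop2, hdrop]
        rw [chunksA]
        rw [if_pos (by rw [← hdrop] at *; simp at hlend ⊢; omega)]
        simp
      · -- short tail chunk
        rw [if_neg hge]
        have hlt : cs.length - j < K + 1 := by
          push_cast at hge
          omega
        have e3 : ((j : Int) + ((cs.length : Int) - (j : Int))) = (cs.length : Int) := by ring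
        have hslice : PySem.List.slice cs (some (j : Int)) (some ((cs.length : Int)))
            = cs.drop j := by
          have h1 := PySem.List.slice_natCast cs j cs.length
          rw [h1, List.take_of_length_le (by simp)]
        rw [e3, hslice]
        rw [loopA_nonpos _ _ _ _ _ _ _ (by omega)]
        rw [hdrop, chunksA]
        rw [if_neg (by rw [← hdrop] at *; simp at hlend ⊢; omega)]
        rw [List.drop_eq_nil_of_le (by omega)]
        rw [chunksA, ← hdrop]
        simp [hlend, Nat.cast_sub hj]

-- B's fold leaves the state untouched into cur while the chunk stays short
lemma foldl_stay (K : Nat) :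
    ∀ (cs cur : List Char) (acc : List (List Char)), cur.length + cs.length ≤ K →
      cs.foldl (stepB ((K : Int) + 1)) (acc, cur) = (acc, cur ++ cs) := by
  intro cs
  induction cs with
  | nil => intro cur acc _; simp
  | cons c rest ih =>
    intro cur acc h
    simp only [List.foldl_cons, stepB]
    rw [if_neg (by
      simp only [List.length_append, List.length_singleton]
      intro hc
      have : cur.length + 1 = K + 1 := by exact_mod_cast hc
      simp at h; omega)]
    rw [ih (cur ++ [c]) acc (by simp at h ⊢; omega)]
    simp

-- B's fold flushes one full chunk of size K+1 once enough characters arrive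
lemma foldl_chunk (K : Nat) :
    ∀ (cs cur : List Char) (acc : List (List Char)),
      K + 1 ≤ cur.length + cs.length → cur.length ≤ K →
      cs.foldl (stepB ((K : Int) + 1)) (acc, cur)
        = (cs.drop (K + 1 - cur.length)).foldl (stepB ((K : Int) + 1))
            (acc ++ [cur ++ cs.take (K + 1 - cur.length)], []) := by
  intro cs
  induction cs with
  | nil => intro cur acc h hK; simp only [List.length_nil] at h; omega
  | cons c rest ih =>
    intro cur acc h hK
    simp only [List.foldl_cons, stepB]
    by_cases hfull : cur.length = K
    · rw [if_pos (by simp [hfull])]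
      have e : K + 1 - cur.length = 1 := by omega
      simp [e]
    · rw [if_neg (by
        simp only [List.length_append, List.length_singleton]
        intro hc
        have : cur.length + 1 = K + 1 := by exact_mod_cast hc
        omega)]
      rw [ih (cur ++ [c]) acc (by simp at h ⊢; omega) (by simp; omega)]
      have e1 : K + 1 - cur.length = (K + 1 - (cur ++ [c]).length) + 1 := by simp; omega
      rw [e1]
      simp only [List.take_succ_cons, List.drop_succ_cons]
      have e2 : cur ++ c :: rest.take (K + 1 - (cur ++ [c]).length)
          = (cur ++ [c]) ++ rest.take (K + 1 - (cur ++ [c]).length) := by simp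
      rw [e2]

-- B's whole computation equals the chunk decomposition
lemma altB_eq_chunksA (fillcs : List Char) (K : Nat) :
    ∀ (n : Nat) (cs : List Char), cs.length = n → ∀ (acc : List (List Char)),
      (let st := cs.foldl (stepB ((K : Int) + 1)) (acc, []);
       if st.2 ≠ [] then st.1 ++ [st.2 ++ PySem.List.pyRepeat fillcs (((K : Int) + 1) - st.2.length)]
       else st.1)
        = acc ++ chunksA fillcs K cs := by
  intro n
  induction n using Nat.strong_induction_on with
  | _ n ih =>
    intro cs hn acc
    match cs with
    | [] => simp [chunksA]
    | c :: rest =>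
      by_cases hge : K + 1 ≤ (c :: rest).length
      · have hfc := foldl_chunk K (c :: rest) [] acc (by simpa using hge) (by simp)
        simp only [List.length_nil, Nat.sub_zero, List.nil_append] at hfc
        simp only [hfc]
        have hd : (c :: rest).drop (K + 1) = rest.drop K := by simp
        rw [hd]
        have := ih (rest.drop K).length (by simp at hge hn ⊢; omega) (rest.drop K) rfl
          (acc ++ [(c :: rest).take (K + 1)])
        simp only at this
        rw [this, chunksA, if_pos hge]
        simp
      · have hst := foldl_stay K (c :: rest) [] acc (by simp at hge ⊢; omega)
        simp only [List.nil_append] at hst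
        simp only [hst]
        rw [if_pos (by simp)]
        rw [chunksA, if_neg hge]
        have : rest.drop K = ([] : List Char) := List.drop_eq_nil_of_le (by simp at hge; omega)
        rw [this, chunksA]

-- ===== VERDICT (by name: the statement is the Claim_ definition above) =====
theorem divideString1_spec : Claim_equal_divideString1 := by
  intro s k fill _ hpre
  unfold Spec_divideString1 divideString1 divideString1_alt
  rcases hpre with hk | hse
  · obtain ⟨K, rfl⟩ : ∃ K : Nat, k = (K : Int) + 1 := ⟨(k - 1).toNat, by omega⟩
    have hA : loopA s.toList fill.toList ((K : Int) + 1) (s.toList.length + 1) []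
        (s.toList.length : Int) 0 = chunksA fill.toList K s.toList := by
      have h := loopA_eq s.toList fill.toList K (s.toList.length + 1) 0 [] (by omega) (by omega)
      simpa using h
    rw [hA]
    have hB := altB_eq_chunksA fill.toList K s.toList.length s.toList rfl []
    simp only [List.nil_append] at hB
    simp only
    rw [hB]
  · subst hse
    have h0 : ("" : String).toList = [] := rfl
    simp only [h0, List.length_nil, Nat.cast_zero, List.foldl_nil]
    rw [loopA_nonpos _ _ _ _ _ _ _ (by omega)]
    simp
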